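-- pv_equiv track=rewrite | github.com/jimtin/zetherion-ai | src/zetherion_ai/skills/agent_bootstrap.py | _default_service_operations
-- ===== SOURCE A (Python) =====
-- from typing import Any
--
-- _SERVICE_VIEW_CAPABILITIES: dict[str, dict[str, str]] = {
--     "github": {
--         "overview": "branch_metadata",
--         "compare": "diff_compare",
--         "pulls": "pr_metadata",
--         "workflows": "workflow_status",
--     },
--     "vercel": {
--         "overview": "project_metadata",
--         "deployments": "deployment_status",
--         "domains": "domain_metadata",
--         "envs": "env_names",
--     },
--     "clerk": {
--         "overview": "instance_metadata",
--         "jwks": "jwks_metadata",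
--         "openid": "issuer_metadata",
--     },
--     "stripe": {
--         "overview": "account_metadata",
--         "products": "product_metadata",
--         "prices": "price_metadata",
--         "customers": "customer_metadata",
--         "subscriptions": "subscription_metadata",
--         "invoices": "invoice_metadata",
--         "webhook_health": "webhook_metadata",
--     },
--     "discord": {
--         "overview": "channel_metadata",
--     },
-- }
--
-- _SERVICE_ACTION_CAPABILITIES: dict[str, dict[str, str]] = {
--     "stripe": {
--         "product.ensure": "product_ensure",
--         "price.ensure": "price_ensure",
--         "customer.link": "customer_link",
--         "subscription.link": "subscription_link",
--         "subscription.update_price": "subscription_update_price",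
--         "meter.config.ensure": "meter_config_ensure",
--     }
-- }
--
-- def _default_service_operations(repo_id: str) -> dict[str, Any]:
--     operations: dict[str, Any] = {}
--     for service_kind, views in _SERVICE_VIEW_CAPABILITIES.items():
--         if service_kind == "discord" and repo_id != "zetherion-ai":
--             continue
--         if service_kind == "stripe" and repo_id != "catalyst-group-solutions":
--             continue
--         if service_kind in {"vercel", "clerk"} and repo_id not in {
--             "catalyst-group-solutions",
--             "zetherion-ai",
--         }:
--             continue
--         operations[service_kind] = {
--             "views": sorted(views.keys()),
--             "actions": sorted(_SERVICE_ACTION_CAPABILITIES.get(service_kind, {}).keys()),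
--         }
--     return operations
-- ===== SOURCE B (Python) =====
-- from typing import Any
--
-- _SERVICE_VIEW_CAPABILITIES: dict[str, dict[str, str]] = {
--     "github": {
--         "overview": "branch_metadata",
--         "compare": "diff_compare",
--         "pulls": "pr_metadata",
--         "workflows": "workflow_status",
--     },
--     "vercel": {
--         "overview": "project_metadata",
--         "deployments": "deployment_status",
--         "domains": "domain_metadata",
--         "envs": "env_names",
--     },
--     "clerk": {
--         "overview": "instance_metadata",
--         "jwks": "jwks_metadata",
--         "openid": "issuer_metadata",
--     },
--     "stripe": {
--         "overview": "account_metadata",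
--         "products": "product_metadata",
--         "prices": "price_metadata",
--         "customers": "customer_metadata",
--         "subscriptions": "subscription_metadata",
--         "invoices": "invoice_metadata",
--         "webhook_health": "webhook_metadata",
--     },
--     "discord": {
--         "overview": "channel_metadata",
--     },
-- }
--
-- _SERVICE_ACTION_CAPABILITIES: dict[str, dict[str, str]] = {
--     "stripe": {
--         "product.ensure": "product_ensure",
--         "price.ensure": "price_ensure",
--         "customer.link": "customer_link",
--         "subscription.link": "subscription_link",
--         "subscription.update_price": "subscription_update_price",
--         "meter.config.ensure": "meter_config_ensure",
--     }
-- }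
--
--
-- def _default_service_operations(repo_id: str) -> dict[str, Any]:
--     # Decide the granted service kinds once, from the repo identity,
--     # then build each entry by direct table lookup.
--     if repo_id == "zetherion-ai":
--         kinds = ["github", "vercel", "clerk", "discord"]
--     elif repo_id == "catalyst-group-solutions":
--         kinds = ["github", "vercel", "clerk", "stripe"]
--     else:
--         kinds = ["github"]
--     return {
--         kind: {
--             "views": sorted(_SERVICE_VIEW_CAPABILITIES[kind]),
--             "actions": sorted(_SERVICE_ACTION_CAPABILITIES.get(kind, {})),
--         }
--         for kind in kinds
--     }
-- ===== Notes on version B (the rewrite author's own statement) =====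
-- stated objective: alternative
-- what changed: Inverted the control flow: instead of filtering the whole capability table with per-service guard branches, B first resolves repo_id to its granted service-kind list in one three-way branch, then builds the entries by direct table lookup over that list.
import Mathlib
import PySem

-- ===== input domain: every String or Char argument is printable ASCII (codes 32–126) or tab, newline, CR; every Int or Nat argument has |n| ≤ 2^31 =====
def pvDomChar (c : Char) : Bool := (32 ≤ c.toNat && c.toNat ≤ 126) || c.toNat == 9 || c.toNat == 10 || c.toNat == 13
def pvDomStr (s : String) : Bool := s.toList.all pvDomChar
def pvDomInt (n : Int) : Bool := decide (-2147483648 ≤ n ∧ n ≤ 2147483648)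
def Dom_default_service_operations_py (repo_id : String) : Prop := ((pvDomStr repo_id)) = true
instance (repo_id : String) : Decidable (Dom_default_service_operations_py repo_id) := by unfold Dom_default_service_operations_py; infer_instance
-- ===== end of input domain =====

-- B resolves repo_id to its granted service-kind list in one branch, then builds
-- entries by table lookup, instead of filtering the table with per-service guards (alternative; same cost).

-- ===== PORT A =====
-- _SERVICE_VIEW_CAPABILITIES, keys in insertion order (only the keys matter downstream)
def pvViewCaps : List (String × List String) :=
  [("github", ["overview", "compare", "pulls", "workflows"]),
   ("vercel", ["overview", "deployments", "domains", "envs"]),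
   ("clerk", ["overview", "jwks", "openid"]),
   ("stripe", ["overview", "products", "prices", "customers", "subscriptions", "invoices", "webhook_health"]),
   ("discord", ["overview"])]

-- _SERVICE_ACTION_CAPABILITIES keys per service
def pvActionCaps : PySem.Dict String (List String) :=
  PySem.Dict.ofList [("stripe", ["product.ensure", "price.ensure", "customer.link",
    "subscription.link", "subscription.update_price", "meter.config.ensure"])]

def default_service_operations_py (repo_id : String) : List (String × List (String × List String)) :=
  (pvViewCaps.foldl (fun (operations : PySem.Dict String (List (String × List String))) skv =>
    let service_kind := skv.1
    let views := skv.2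
    if service_kind == "discord" && !(repo_id == "zetherion-ai") then operations
    else if service_kind == "stripe" && !(repo_id == "catalyst-group-solutions") then operations
    else if (service_kind == "vercel" || service_kind == "clerk") &&
            !(repo_id == "catalyst-group-solutions" || repo_id == "zetherion-ai") then operations
    else operations.insert service_kind
      [("views", PySem.List.sorted views (fun x => x) false),
       ("actions", PySem.List.sorted (pvActionCaps.getD service_kind []) (fun x => x) false)])
    PySem.Dict.empty).items

-- ===== PORT B =====
-- pvViewDict: the same view table as a dict; B indexes it by kind
-- (every selected kind is a key of the table, so the [] default of getD is never used)
def pvViewDict : PySem.Dict String (List String) := PySem.Dict.ofList pvViewCaps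

def default_service_operations_py_alt (repo_id : String) : List (String × List (String × List String)) :=
  let kinds :=
    if repo_id == "zetherion-ai" then ["github", "vercel", "clerk", "discord"]
    else if repo_id == "catalyst-group-solutions" then ["github", "vercel", "clerk", "stripe"]
    else ["github"]
  kinds.map (fun kind =>
    (kind,
      [("views", PySem.List.sorted (pvViewDict.getD kind []) (fun x => x) false),
       ("actions", PySem.List.sorted (pvActionCaps.getD kind []) (fun x => x) false)]))

-- ===== PRECONDITION & SPEC =====
def Spec_default_service_operations_py (repo_id : String) (out : List (String × List (String × List String))) : Prop := out = default_service_operations_py_alt repo_id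
instance (repo_id : String) (out : List (String × List (String × List String))) : Decidable (Spec_default_service_operations_py repo_id out) := by unfold Spec_default_service_operations_py; infer_instance

-- ===== CLAIM (what is proved, stated in full; the proofs are below) =====
def Claim_equal_default_service_operations_py : Prop := ∀ (repo_id : String), Dom_default_service_operations_py repo_id → Spec_default_service_operations_py repo_id (default_service_operations_py repo_id)

-- ===== LEMMAS AND PROOFS =====

-- ===== VERDICT (by name: the statement is the Claim_ definition above) =====
theorem default_service_operations_py_spec : Claim_equal_default_service_operations_py := by
  intro repo_id _
  unfold Spec_default_service_operations_py
  by_cases h1 : repo_id = "zetherion-ai" <;> by_cases h2 : repo_id = "catalyst-group-solutions" <;>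
    simp_all [default_service_operations_py, default_service_operations_py_alt,
      pvViewCaps, pvViewDict, pvActionCaps, List.foldl, List.map, List.find?,
      PySem.Dict.insert, PySem.Dict.update, PySem.Dict.ofList, PySem.Dict.empty,
      PySem.Dict.getD, PySem.Dict.get?]
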